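-- pv_equiv track=rewrite | github.com/BenyGH2003/NeuroAI | app.py | ensemble_results
-- ===== SOURCE A (Python) =====
-- from typing import TypedDict, Optional
--
-- class DatasetState(TypedDict):
--     paper_text: str
--     dataset_name: Optional[str]
--     doi: Optional[str]
--     url: Optional[str]
--     year: Optional[str]
--     access_type: Optional[str]
--     institution: Optional[str]
--     country: Optional[str]
--     modality: Optional[str]
--     resolution: Optional[str]
--     subject_no_f: Optional[str]
--     slice_scan_no: Optional[str]
--     age_range: Optional[str]
--     acquisition_protocol: Optional[str]
--     format: Optional[str]
--     segmentation_mask: Optional[str]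
--     preprocessing: Optional[str]
--     disease: Optional[str]
--     healthy_control: Optional[str]
--     staging_information: Optional[str]
--     clinical_data_score: Optional[str]
--     histopathology: Optional[str]
--     lab_data: Optional[str]
--
-- def ensemble_results(chunk_results):
--     ensembled = {}
--     fields = [k for k in DatasetState.__annotations__ if k != "paper_text"]
--     for field in fields:
--         values = [result.get(field, "Not specified") for result in chunk_results]
--         for value in values:
--             if value != "Not specified":
--                 ensembled[field] = value
--                 break
--         else:
--             ensembled[field] = "Not specified"
--     return ensembled
-- ===== SOURCE B (Python) =====
-- from typing import TypedDict, Optional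
--
-- class DatasetState(TypedDict):
--     paper_text: str
--     dataset_name: Optional[str]
--     doi: Optional[str]
--     url: Optional[str]
--     year: Optional[str]
--     access_type: Optional[str]
--     institution: Optional[str]
--     country: Optional[str]
--     modality: Optional[str]
--     resolution: Optional[str]
--     subject_no_f: Optional[str]
--     slice_scan_no: Optional[str]
--     age_range: Optional[str]
--     acquisition_protocol: Optional[str]
--     format: Optional[str]
--     segmentation_mask: Optional[str]
--     preprocessing: Optional[str]
--     disease: Optional[str]
--     healthy_control: Optional[str]
--     staging_information: Optional[str]
--     clinical_data_score: Optional[str]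
--     histopathology: Optional[str]
--     lab_data: Optional[str]
--
-- def ensemble_results(chunk_results):
--     # chunk-outer single pass: fill still-missing fields from each chunk in turn,
--     # stop as soon as every field is filled; fields absent everywhere stay "Not specified".
--     fields = [k for k in DatasetState.__annotations__ if k != "paper_text"]
--     found = {}
--     remaining = fields
--     for chunk in chunk_results:
--         if not remaining:
--             break
--         still = []
--         for f in remaining:
--             v = chunk.get(f, "Not specified")
--             if v != "Not specified":
--                 found[f] = v
--             else:
--                 still.append(f)
--         remaining = still
--     return {f: found.get(f, "Not specified") for f in fields}
-- ===== Notes on version B (the rewrite author's own statement) =====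
-- stated objective: alternative
-- what changed: Replaced A's field-outer scan (for each of the 22 fields, rebuild the full per-chunk value list and scan it) with a chunk-outer single pass that maintains the list of still-unfilled fields, fills them as chunks are seen, and stops early once every field is filled.
import Mathlib
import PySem

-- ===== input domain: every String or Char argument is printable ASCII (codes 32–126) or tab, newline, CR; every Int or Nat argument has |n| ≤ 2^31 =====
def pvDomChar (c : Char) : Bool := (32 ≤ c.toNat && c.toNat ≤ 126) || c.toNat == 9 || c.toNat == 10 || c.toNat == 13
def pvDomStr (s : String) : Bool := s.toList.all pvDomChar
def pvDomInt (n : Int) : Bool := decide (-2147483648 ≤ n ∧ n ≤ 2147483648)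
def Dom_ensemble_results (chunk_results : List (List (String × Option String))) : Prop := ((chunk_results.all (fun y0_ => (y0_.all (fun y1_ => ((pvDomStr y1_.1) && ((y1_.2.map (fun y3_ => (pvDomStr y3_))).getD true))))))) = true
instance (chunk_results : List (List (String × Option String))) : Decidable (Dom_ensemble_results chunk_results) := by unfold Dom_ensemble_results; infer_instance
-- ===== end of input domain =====

-- B replaces A's field-outer scan by a chunk-outer single pass with an early stop
-- once every field is filled (objective: alternative decomposition, same asymptotic cost).


-- the 22 annotation keys of DatasetState other than "paper_text", in declaration order
def pvFields : List String :=
  ["dataset_name", "doi", "url", "year", "access_type", "institution", "country",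
   "modality", "resolution", "subject_no_f", "slice_scan_no", "age_range",
   "acquisition_protocol", "format", "segmentation_mask", "preprocessing", "disease",
   "healthy_control", "staging_information", "clinical_data_score", "histopathology",
   "lab_data"]

-- ===== PORT A =====
-- the inner 'for value in values: … break / else' scan; 'v.getD "None"' is only reached
-- on a none value, which Pre_ excludes (the Python stores None there, outside the result type)
def pvScanA : List (Option String) → String
  | [] => "Not specified"
  | v :: rest => if v ≠ some "Not specified" then v.getD "None" else pvScanA rest

def ensemble_results (chunk_results : List (List (String × Option String))) : List (String × String) :=
  (pvFields.foldl
    (fun ensembled field =>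
      PySem.Dict.insert ensembled field
        (pvScanA (chunk_results.map
          (fun result => PySem.Dict.getD (PySem.Dict.mk result) field (some "Not specified")))))
    PySem.Dict.empty).items

-- ===== PORT B =====
-- inner loop of Source B: fill still-missing fields from one chunk, return (found, still)
def pvFillB (chunk : List (String × Option String)) :
    List String → PySem.Dict String String → PySem.Dict String String × List String
  | [], found => (found, [])
  | f :: fs, found =>
    let v := PySem.Dict.getD (PySem.Dict.mk chunk) f (some "Not specified")
    if v ≠ some "Not specified" then
      let r := pvFillB chunk fs (PySem.Dict.insert found f (v.getD "None"))
      (r.1, r.2)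
    else
      let r := pvFillB chunk fs found
      (r.1, f :: r.2)

-- outer loop of Source B over the chunks, with the early 'break' when nothing remains
def pvGoB : List (List (String × Option String)) → List String → PySem.Dict String String →
    PySem.Dict String String
  | [], _, found => found
  | c :: cs, rem, found =>
    if rem.isEmpty then found
    else
      let r := pvFillB c rem found
      pvGoB cs r.2 r.1

def ensemble_results_alt (chunk_results : List (List (String × Option String))) : List (String × String) :=
  let found := pvGoB chunk_results pvFields PySem.Dict.empty
  pvFields.map (fun f => (f, PySem.Dict.getD found f "Not specified"))

-- ===== PRECONDITION & SPEC =====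
-- Pre_ excludes inputs where some chunk maps one of the 22 tracked fields to None: there A
-- returns a dict containing None where a str value is expected (outside the result type).
def Pre_ensemble_results (chunk_results : List (List (String × Option String))) : Prop :=
  ∀ chunk ∈ chunk_results, ∀ p ∈ chunk, p.2 = none → p.1 ∉ pvFields
instance (chunk_results : List (List (String × Option String))) : Decidable (Pre_ensemble_results chunk_results) := by unfold Pre_ensemble_results; infer_instance

def pvWitness_ensemble_results : (List (List (String × Option String))) :=
  [[("dataset_name", some "ADNI"), ("note", none)], [("year", some "2019")]]

def Spec_ensemble_results (chunk_results : List (List (String × Option String))) (out : List (String × String)) : Prop := out = ensemble_results_alt chunk_results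
instance (chunk_results : List (List (String × Option String))) (out : List (String × String)) : Decidable (Spec_ensemble_results chunk_results out) := by unfold Spec_ensemble_results; infer_instance

-- ===== CLAIM (what is proved, stated in full; the proofs are below) =====
def Claim_equal_ensemble_results : Prop := ∀ (chunk_results : List (List (String × Option String))), Dom_ensemble_results chunk_results → Pre_ensemble_results chunk_results → Spec_ensemble_results chunk_results (ensemble_results chunk_results)

-- ===== LEMMAS AND PROOFS =====

-- generic fresh-key insertion fold: distinct fresh keys append in order
theorem pv_foldl_insert_items (L : List String) (g : String → String)
    (d : PySem.Dict String String) (hd : ∀ f ∈ L, d.contains f = false) (hnd : L.Nodup) :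
    (L.foldl (fun e f => PySem.Dict.insert e f (g f)) d).items =
      d.items ++ L.map (fun f => (f, g f)) := by
  induction L generalizing d with
  | nil => simp
  | cons a L ih =>
    simp only [List.foldl_cons, List.map_cons]
    rw [ih _ ?_ (List.nodup_cons.mp hnd).2]
    · rw [PySem.Dict.items_insert_of_not_contains _ _ (hd a List.mem_cons_self)]
      simp
    · intro f hf
      rw [PySem.Dict.contains_insert]
      have hne : f ≠ a := fun h => (List.nodup_cons.mp hnd).1 (h ▸ hf)
      simp [hne, hd f (List.mem_cons_of_mem a hf)]

-- the value both programs assign to field f: the first chunk value ≠ "Not specified"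
def pvFirst (f : String) : List (List (String × Option String)) → String
  | [] => "Not specified"
  | c :: cs =>
    let v := PySem.Dict.getD (PySem.Dict.mk c) f (some "Not specified")
    if v = some "Not specified" then pvFirst f cs else v.getD "None"

theorem pvScanA_map (f : String) (cs : List (List (String × Option String))) :
    pvScanA (cs.map (fun r => PySem.Dict.getD (PySem.Dict.mk r) f (some "Not specified"))) =
      pvFirst f cs := by
  induction cs with
  | nil => rfl
  | cons c cs ih =>
    simp only [List.map_cons, pvScanA, pvFirst, ih]
    by_cases h : PySem.Dict.getD (PySem.Dict.mk c) f (some "Not specified") = some "Not specified" <;>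
      simp [h]

theorem ensemble_results_eq_map (chunk_results : List (List (String × Option String))) :
    ensemble_results chunk_results = pvFields.map (fun f => (f, pvFirst f chunk_results)) := by
  unfold ensemble_results
  rw [pv_foldl_insert_items pvFields _ PySem.Dict.empty
        (by intro a _; exact PySem.Dict.contains_empty a) (by decide)]
  simp only [PySem.Dict.empty, List.nil_append]
  exact List.map_congr_left (fun f _ => by rw [pvScanA_map])

theorem pvFillB_snd (c : List (String × Option String)) (rem : List String)
    (found : PySem.Dict String String) :
    (pvFillB c rem found).2 =
      rem.filter (fun f => PySem.Dict.getD (PySem.Dict.mk c) f (some "Not specified") == some "Not specified") := by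
  induction rem generalizing found with
  | nil => rfl
  | cons g fs ih =>
    simp only [pvFillB, List.filter_cons]
    by_cases h : PySem.Dict.getD (PySem.Dict.mk c) g (some "Not specified") = some "Not specified" <;>
      simp [h, ih]

theorem pvFillB_getD (c : List (String × Option String)) (rem : List String)
    (found : PySem.Dict String String) (f : String) :
    PySem.Dict.getD (pvFillB c rem found).1 f "Not specified" =
      if f ∈ rem ∧ PySem.Dict.getD (PySem.Dict.mk c) f (some "Not specified") ≠ some "Not specified"
      then (PySem.Dict.getD (PySem.Dict.mk c) f (some "Not specified")).getD "None"
      else PySem.Dict.getD found f "Not specified" := by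
  induction rem generalizing found with
  | nil => simp [pvFillB]
  | cons g fs ih =>
    simp only [pvFillB]
    by_cases hg : PySem.Dict.getD (PySem.Dict.mk c) g (some "Not specified") = some "Not specified"
    · simp only [hg, ne_eq, not_true_eq_false, if_false, ih]
      by_cases hf : f ∈ fs ∧ PySem.Dict.getD (PySem.Dict.mk c) f (some "Not specified") ≠ some "Not specified"
      · simp [hf, List.mem_cons.mpr (Or.inr hf.1)]
      · rw [if_neg hf, if_neg]
        rintro ⟨hmem, hne⟩
        rcases List.mem_cons.mp hmem with h | h
        · exact hne (h ▸ hg)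
        · exact hf ⟨h, hne⟩
    · simp only [hg, ne_eq, not_false_eq_true, if_true, ih]
      by_cases hf : f ∈ fs ∧ PySem.Dict.getD (PySem.Dict.mk c) f (some "Not specified") ≠ some "Not specified"
      · simp [hf, List.mem_cons.mpr (Or.inr hf.1)]
      · rw [if_neg hf]
        by_cases hfg : f = g
        · subst hfg
          simp [PySem.Dict.getD_insert_self, hg, List.mem_cons]
        · rw [PySem.Dict.getD_insert, if_neg hfg, if_neg]
          rintro ⟨hmem, hne⟩
          rcases List.mem_cons.mp hmem with h | h
          · exact hfg h
          · exact hf ⟨h, hne⟩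

theorem pvGoB_getD (cs : List (List (String × Option String))) (rem : List String)
    (found : PySem.Dict String String) (f : String)
    (hinv : f ∈ rem → PySem.Dict.getD found f "Not specified" = "Not specified") :
    PySem.Dict.getD (pvGoB cs rem found) f "Not specified" =
      if f ∈ rem then pvFirst f cs else PySem.Dict.getD found f "Not specified" := by
  induction cs generalizing rem found with
  | nil =>
    simp only [pvGoB, pvFirst]
    by_cases h : f ∈ rem
    · simp [h, hinv h]
    · simp [h]
  | cons c cs ih =>
    simp only [pvGoB]
    by_cases hemp : rem.isEmpty
    · have : rem = [] := List.isEmpty_iff.mp hemp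
      subst this; simp
    · rw [if_neg hemp]
      rw [ih (pvFillB c rem found).2 (pvFillB c rem found).1 ?_]
      · rw [pvFillB_snd, pvFillB_getD]
        by_cases hf : f ∈ rem
        · by_cases hhit : PySem.Dict.getD (PySem.Dict.mk c) f (some "Not specified") = some "Not specified"
          · simp [pvFirst, hf, hhit]
          · simp [pvFirst, hf, hhit]
        · have hnf : f ∉ List.filter (fun f => PySem.Dict.getD (PySem.Dict.mk c) f (some "Not specified") == some "Not specified") rem := fun h => hf (List.mem_of_mem_filter h)
          simp [hf, hnf]
      · intro hmem
        rw [pvFillB_snd] at hmem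
        have hrem := List.mem_of_mem_filter hmem
        have hhit := (List.mem_filter.mp hmem).2
        rw [pvFillB_getD, if_neg, hinv hrem]
        rintro ⟨_, hne⟩
        exact hne (by simpa using hhit)

theorem ensemble_results_alt_eq_map (chunk_results : List (List (String × Option String))) :
    ensemble_results_alt chunk_results = pvFields.map (fun f => (f, pvFirst f chunk_results)) := by
  unfold ensemble_results_alt
  refine List.map_congr_left (fun f hf => ?_)
  rw [pvGoB_getD chunk_results pvFields PySem.Dict.empty f (fun _ => by simp [PySem.Dict.getD_empty]),
    if_pos hf]

-- ===== VERDICT (by name: the statement is the Claim_ definition above) =====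
theorem ensemble_results_spec : Claim_equal_ensemble_results := by
  intro chunk_results _ _
  unfold Spec_ensemble_results
  rw [ensemble_results_eq_map, ensemble_results_alt_eq_map]
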